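-- pv_equiv track=rewrite | github.com/tsikkema24/hevy | app/services/stats.py | categorize_exercise
-- ===== SOURCE A (Python) =====
-- MUSCLE_GROUPS = {
--     'Chest': ['bench press', 'chest fly', 'chest press', 'push up', 'dip', 'pec'],
--     'Back': ['row', 'pull up', 'pulldown', 'lat pull', 'deadlift', 'shrug'],
--     'Shoulders': ['shoulder press', 'lateral raise', 'front raise', 'overhead press', 'military press', 'arnold press'],
--     'Biceps': ['curl', 'bicep', 'hammer curl', 'preacher curl', 'concentration curl', 'spider curl'],
--     'Triceps': ['tricep', 'skull crusher', 'pushdown', 'tricep extension', 'overhead extension', 'close grip', 'dip'],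
--     'Legs': ['squat', 'leg press', 'leg curl', 'leg extension', 'lunge', 'calf', 'hip thrust'],
--     'Core': ['crunch', 'plank', 'ab', 'sit up', 'russian twist', 'leg raise'],
--     'Cardio': ['run', 'bike', 'treadmill', 'elliptical', 'rowing'],
-- }
--
-- def categorize_exercise(exercise_name: str) -> str:
--     """Categorize an exercise based on its name"""
--     name_lower = exercise_name.lower()
--
--     # Check biceps first (more specific patterns)
--     biceps_keywords = MUSCLE_GROUPS.get('Biceps', [])
--     if any(keyword in name_lower for keyword in biceps_keywords):
--         # Exclude tricep exercises that might have 'curl' in the name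
--         if 'tricep' not in name_lower:
--             return 'Biceps'
--
--     # Check triceps
--     triceps_keywords = MUSCLE_GROUPS.get('Triceps', [])
--     if any(keyword in name_lower for keyword in triceps_keywords):
--         return 'Triceps'
--
--     # Check other muscle groups
--     for muscle_group, keywords in MUSCLE_GROUPS.items():
--         if muscle_group in ['Biceps', 'Triceps']:
--             continue  # Already checked above
--         if any(keyword in name_lower for keyword in keywords):
--             return muscle_group
--
--     return 'Other'
-- ===== SOURCE B (Python) =====
-- MUSCLE_GROUPS = {
--     'Chest': ['bench press', 'chest fly', 'chest press', 'push up', 'dip', 'pec'],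
--     'Back': ['row', 'pull up', 'pulldown', 'lat pull', 'deadlift', 'shrug'],
--     'Shoulders': ['shoulder press', 'lateral raise', 'front raise', 'overhead press', 'military press', 'arnold press'],
--     'Biceps': ['curl', 'bicep', 'hammer curl', 'preacher curl', 'concentration curl', 'spider curl'],
--     'Triceps': ['tricep', 'skull crusher', 'pushdown', 'tricep extension', 'overhead extension', 'close grip', 'dip'],
--     'Legs': ['squat', 'leg press', 'leg curl', 'leg extension', 'lunge', 'calf', 'hip thrust'],
--     'Core': ['crunch', 'plank', 'ab', 'sit up', 'russian twist', 'leg raise'],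
--     'Cardio': ['run', 'bike', 'treadmill', 'elliptical', 'rowing'],
-- }
--
-- PRIORITY = ['Biceps', 'Triceps', 'Chest', 'Back', 'Shoulders', 'Legs', 'Core', 'Cardio']
--
--
-- def categorize_exercise(exercise_name: str) -> str:
--     """Categorize an exercise based on its name (index-build + priority pass)."""
--     name_lower = exercise_name.lower()
--     matched = {group for group, keywords in MUSCLE_GROUPS.items()
--                if any(keyword in name_lower for keyword in keywords)}
--     if 'tricep' in name_lower:
--         matched.discard('Biceps')
--     for group in PRIORITY:
--         if group in matched:
--             return group
--     return 'Other'
-- ===== Notes on version B (the rewrite author's own statement) =====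
-- stated objective: alternative
-- what changed: Replaces A's short-circuit cascade of special-cased checks (Biceps guard, Triceps check, then a skip-loop over the dict) with an index-build: one comprehension collects every matching group into a set, the tricep exclusion is applied to the set, and a single priority-list pass selects the answer.
import Mathlib
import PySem

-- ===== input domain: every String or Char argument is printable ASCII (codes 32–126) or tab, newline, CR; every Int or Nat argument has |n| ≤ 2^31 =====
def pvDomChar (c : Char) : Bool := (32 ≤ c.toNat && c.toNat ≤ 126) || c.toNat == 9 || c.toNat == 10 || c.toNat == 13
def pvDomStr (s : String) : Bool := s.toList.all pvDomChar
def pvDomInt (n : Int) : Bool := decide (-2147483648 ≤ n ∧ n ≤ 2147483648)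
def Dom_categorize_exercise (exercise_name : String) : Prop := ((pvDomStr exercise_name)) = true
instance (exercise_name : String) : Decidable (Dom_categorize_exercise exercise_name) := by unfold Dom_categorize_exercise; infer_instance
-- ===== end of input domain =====

-- B is an alternative decomposition (index-build into a set, then one priority pass); return value proved equal to A's on all of Dom.

-- ===== PORT A =====
def muscleGroups : PySem.Dict String (List String) := PySem.Dict.ofList [
  ("Chest", ["bench press", "chest fly", "chest press", "push up", "dip", "pec"]),
  ("Back", ["row", "pull up", "pulldown", "lat pull", "deadlift", "shrug"]),
  ("Shoulders", ["shoulder press", "lateral raise", "front raise", "overhead press", "military press", "arnold press"]),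
  ("Biceps", ["curl", "bicep", "hammer curl", "preacher curl", "concentration curl", "spider curl"]),
  ("Triceps", ["tricep", "skull crusher", "pushdown", "tricep extension", "overhead extension", "close grip", "dip"]),
  ("Legs", ["squat", "leg press", "leg curl", "leg extension", "lunge", "calf", "hip thrust"]),
  ("Core", ["crunch", "plank", "ab", "sit up", "russian twist", "leg raise"]),
  ("Cardio", ["run", "bike", "treadmill", "elliptical", "rowing"])]

-- the 'for muscle_group, keywords in MUSCLE_GROUPS.items()' loop with early return, skipping Biceps/Triceps
def categorizeLoopA (name_lower : String) : List (String × List String) → String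
  | [] => "Other"
  | (g, kws) :: rest =>
    if g = "Biceps" ∨ g = "Triceps" then categorizeLoopA name_lower rest
    else if kws.any (fun kw => PySem.Str.isIn kw name_lower) then g
    else categorizeLoopA name_lower rest

def categorize_exercise (exercise_name : String) : String :=
  let name_lower := PySem.Str.lower exercise_name
  let biceps_keywords := muscleGroups.getD "Biceps" []
  if biceps_keywords.any (fun kw => PySem.Str.isIn kw name_lower)
     && !(PySem.Str.isIn "tricep" name_lower) then "Biceps"
  else
    let triceps_keywords := muscleGroups.getD "Triceps" []
    if triceps_keywords.any (fun kw => PySem.Str.isIn kw name_lower) then "Triceps"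
    else categorizeLoopA name_lower muscleGroups.items

-- ===== PORT B =====
def priorityList : List String := ["Biceps", "Triceps", "Chest", "Back", "Shoulders", "Legs", "Core", "Cardio"]

-- first group of the priority list present in the matched set, else "Other"
def pickPriority (matched : PySem.Set String) : List String → String
  | [] => "Other"
  | g :: rest => if PySem.Set.contains matched g then g else pickPriority matched rest

def categorize_exercise_alt (exercise_name : String) : String :=
  let name_lower := PySem.Str.lower exercise_name
  let matched := muscleGroups.items.foldl
    (fun s p => if p.2.any (fun kw => PySem.Str.isIn kw name_lower) then PySem.Set.add s p.1 else s)
    PySem.Set.empty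
  let matched := if PySem.Str.isIn "tricep" name_lower then PySem.Set.discard matched "Biceps" else matched
  pickPriority matched priorityList

-- ===== PRECONDITION & SPEC =====
def Spec_categorize_exercise (exercise_name : String) (out : String) : Prop := out = categorize_exercise_alt exercise_name
instance (exercise_name : String) (out : String) : Decidable (Spec_categorize_exercise exercise_name out) := by unfold Spec_categorize_exercise; infer_instance

-- ===== CLAIM (what is proved, stated in full; the proofs are below) =====
def Claim_equal_categorize_exercise : Prop := ∀ (exercise_name : String), Dom_categorize_exercise exercise_name → Spec_categorize_exercise exercise_name (categorize_exercise exercise_name)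

-- ===== LEMMAS AND PROOFS =====

theorem categorize_exercise_spec : Claim_equal_categorize_exercise := by
  intro s _
  unfold Spec_categorize_exercise categorize_exercise categorize_exercise_alt
  have hItems : muscleGroups.items = [
    ("Chest", ["bench press", "chest fly", "chest press", "push up", "dip", "pec"]),
    ("Back", ["row", "pull up", "pulldown", "lat pull", "deadlift", "shrug"]),
    ("Shoulders", ["shoulder press", "lateral raise", "front raise", "overhead press", "military press", "arnold press"]),
    ("Biceps", ["curl", "bicep", "hammer curl", "preacher curl", "concentration curl", "spider curl"]),
    ("Triceps", ["tricep", "skull crusher", "pushdown", "tricep extension", "overhead extension", "close grip", "dip"]),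
    ("Legs", ["squat", "leg press", "leg curl", "leg extension", "lunge", "calf", "hip thrust"]),
    ("Core", ["crunch", "plank", "ab", "sit up", "russian twist", "leg raise"]),
    ("Cardio", ["run", "bike", "treadmill", "elliptical", "rowing"])] := by decide
  have hB : muscleGroups.getD "Biceps" [] = ["curl", "bicep", "hammer curl", "preacher curl", "concentration curl", "spider curl"] := by decide
  have hT : muscleGroups.getD "Triceps" [] = ["tricep", "skull crusher", "pushdown", "tricep extension", "overhead extension", "close grip", "dip"] := by decide
  simp only [hItems, hB, hT, categorizeLoopA, List.foldl]
  generalize (PySem.Str.lower s) = nl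
  simp only [String.reduceEq, or_self, or_false, false_or, if_true, if_false]
  generalize (["bench press", "chest fly", "chest press", "push up", "dip", "pec"].any (fun kw => PySem.Str.isIn kw nl)) = bCh
  generalize (["row", "pull up", "pulldown", "lat pull", "deadlift", "shrug"].any (fun kw => PySem.Str.isIn kw nl)) = bBa
  generalize (["shoulder press", "lateral raise", "front raise", "overhead press", "military press", "arnold press"].any (fun kw => PySem.Str.isIn kw nl)) = bSh
  generalize (["curl", "bicep", "hammer curl", "preacher curl", "concentration curl", "spider curl"].any (fun kw => PySem.Str.isIn kw nl)) = bBi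
  generalize (["tricep", "skull crusher", "pushdown", "tricep extension", "overhead extension", "close grip", "dip"].any (fun kw => PySem.Str.isIn kw nl)) = bTr
  generalize (["squat", "leg press", "leg curl", "leg extension", "lunge", "calf", "hip thrust"].any (fun kw => PySem.Str.isIn kw nl)) = bLe
  generalize (["crunch", "plank", "ab", "sit up", "russian twist", "leg raise"].any (fun kw => PySem.Str.isIn kw nl)) = bCo
  generalize (["run", "bike", "treadmill", "elliptical", "rowing"].any (fun kw => PySem.Str.isIn kw nl)) = bCa
  generalize (PySem.Str.isIn "tricep" nl) = t
  cases bCh <;> cases bBa <;> cases bSh <;> cases bBi <;> cases bTr <;>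
    cases bLe <;> cases bCo <;> cases bCa <;> cases t <;> decide
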